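-- pv_equiv track=rewrite | github.com/leobkmer/spp_dcj_experimental | scripts/data_utils.py | get_unimog
-- ===== SOURCE A (Python) =====
-- EXTR_HEAD       = 'h'
--
-- EXTR_TAIL       = 't'
--
-- DEFAULT_GENE_FAM_SEP = '_'
--
-- def getFamily(gene_extr, sep=DEFAULT_GENE_FAM_SEP):
--     ''' @returns the family identifier of a gene or gene extremity'''
--     assert type(gene_extr) is tuple or type(gene_extr) is str
--
--     # input can either be
--     if type(gene_extr) == tuple:
--         gene_extr = gene_extr[0]
--
--     return gene_extr[:gene_extr.find(sep)]
--
-- def create_adjacency_map(adjacency_list):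
--     a_map=dict()
--     for x,y in adjacency_list:
--         assert(x not in a_map)
--         assert(y not in a_map)
--         a_map[x]=y
--         a_map[y]=x
--     return a_map
--
-- def invert_extremity(yx):
--     y,x = yx
--     x_ = EXTR_HEAD if x==EXTR_TAIL else EXTR_TAIL
--     return y,x_
--
-- def get_unimog(genome,genes,adjacencies,sep):
--     a_map=create_adjacency_map(adjacencies[genome])
--     telomeres = []
--     visited = dict()
--     for gene in genes[genome]:
--         for xt in [EXTR_HEAD,EXTR_TAIL]:
--             extremity = (gene,xt)
--             visited[extremity]=False
--             if extremity not in a_map: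
--                 telomeres.append(extremity)
--     assert(len(telomeres)%2==0)
--     lin_chroms = []
--     for t in telomeres:
--         curr_chrom=[]
--         if visited[t]:
--             continue
--         curr = t
--
--         while True:
--             assert(not visited[curr])
--             visited[curr]=True
--             gene,xt = invert_extremity(curr)
--             assert(not visited[(gene,xt)])
--             visited[(gene,xt)]=True
--             if xt==EXTR_HEAD:
--                 curr_chrom.append(getFamily(gene,sep))
--             else:
--                 curr_chrom.append('-'+getFamily(gene,sep))
--             if (gene,xt) in a_map:
--                 curr = a_map[(gene,xt)]
--             else:
--                 break
--         lin_chroms.append(curr_chrom)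
--     circ_chroms = []
--     for xtr in visited:
--         if visited[xtr]:
--             continue
--         curr = xtr
--         curr_chrom=[]
--         while True:
--             assert(not visited[curr])
--             visited[curr]=True
--             gene,xt = invert_extremity(curr)
--             assert(not visited[(gene,xt)])
--             visited[(gene,xt)]=True
--             if xt==EXTR_HEAD:
--                 curr_chrom.append(getFamily(gene,sep))
--             else:
--                 curr_chrom.append('-'+getFamily(gene,sep))
--             assert((gene,xt) in a_map)
--             curr = a_map[(gene,xt)]
--             if visited[curr]:
--                 break
--         circ_chroms.append(curr_chrom)
--     unimog_str = ">{}".format(genome)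
--     for l in lin_chroms:
--         unimog_str+='\n'
--         unimog_str+=(' '.join(l))
--         unimog_str+=" |"
--     for c in circ_chroms:
--         unimog_str+='\n'
--         unimog_str+=(' '.join(c))
--         unimog_str+=" )"
--     return unimog_str
-- ===== SOURCE B (Python) =====
-- def get_unimog(genome, genes, adjacencies, sep):
--     a = {e: f for x, y in adjacencies[genome] for e, f in ((x, y), (y, x))}
--
--     def fam(g):
--         return g[:g.find(sep)]
--
--     def tok(g, x):
--         return fam(g) if x == 't' else '-' + fam(g)
--
--     def flip(x):
--         return 'h' if x == 't' else 't'
--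
--     visited = set()
--
--     def walk_lin(g, x):
--         # emit this gene, then follow the adjacency leaving its other extremity
--         visited.add((g, x))
--         visited.add((g, flip(x)))
--         nxt = a.get((g, flip(x)))
--         if nxt is None:
--             return [tok(g, x)]
--         return [tok(g, x)] + walk_lin(*nxt)
--
--     def walk_circ(g, x):
--         visited.add((g, x))
--         visited.add((g, flip(x)))
--         nxt = a.get((g, flip(x)))
--         if nxt is None or nxt in visited:
--             return [tok(g, x)]
--         return [tok(g, x)] + walk_circ(*nxt)
--
--     gs = genes[genome]
--     lins = [walk_lin(g, x) for g in gs for x in 'ht'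
--             if (g, x) not in a and (g, x) not in visited]
--     circs = [walk_circ(g, x) for g in gs for x in 'ht' if (g, x) not in visited]
--     return '\n'.join(['>' + genome]
--                      + [' '.join(c) + ' |' for c in lins]
--                      + [' '.join(c) + ' )' for c in circs])
-- ===== Notes on version B (the rewrite author's own statement) =====
-- stated objective: alternative
-- what changed: B keeps A's traversal order but restructures everything around it: the adjacency map is built by one flat dict comprehension, the pre-seeded visited bool-dict and the telomere list are replaced by a visited set tested on the fly, each chromosome is emitted by a recursive walk building its token list front-to-back instead of A's while-loop accumulator, and the output is one '\n'.join instead of repeated string concatenation.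
import Mathlib
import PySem

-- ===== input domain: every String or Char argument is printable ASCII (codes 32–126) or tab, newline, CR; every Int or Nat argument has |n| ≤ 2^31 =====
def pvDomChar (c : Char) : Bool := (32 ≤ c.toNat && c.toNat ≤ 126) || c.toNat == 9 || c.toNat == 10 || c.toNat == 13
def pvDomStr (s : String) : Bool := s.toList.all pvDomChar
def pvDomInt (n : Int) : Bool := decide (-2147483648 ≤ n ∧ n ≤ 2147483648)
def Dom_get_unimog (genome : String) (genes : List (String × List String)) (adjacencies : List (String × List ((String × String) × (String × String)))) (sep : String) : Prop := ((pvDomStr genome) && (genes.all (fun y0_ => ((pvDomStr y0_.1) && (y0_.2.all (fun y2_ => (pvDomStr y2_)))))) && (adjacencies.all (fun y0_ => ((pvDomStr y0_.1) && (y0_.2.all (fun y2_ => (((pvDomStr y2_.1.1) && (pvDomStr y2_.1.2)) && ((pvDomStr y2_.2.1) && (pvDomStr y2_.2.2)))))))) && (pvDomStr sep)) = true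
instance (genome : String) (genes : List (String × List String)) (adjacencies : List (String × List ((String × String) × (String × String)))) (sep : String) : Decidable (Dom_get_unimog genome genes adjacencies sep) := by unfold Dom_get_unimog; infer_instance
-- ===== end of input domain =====

-- B restructures A's traversal: one combined pass layout — adjacency dict built by a flat
-- comprehension, a visited *set* instead of A's pre-seeded bool dict + telomere list, recursive
-- walks that build each chromosome front-to-back, and a final '\n'.join instead of string +=.
-- Same value as A on Pre_ (objective: alternative decomposition, no speed claim).


abbrev PvExt := String × String

-- helpers shared by both ports (A's getFamily and the coordinate flip of invert_extremity;
-- B's fam/flip lambdas are the same code)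
def pvFamily (g sep : String) : String := PySem.Str.slice g none (some (PySem.Str.find g sep))
def pvFlip (x : String) : String := if x == "t" then "h" else "t"

-- ===== PORT A =====
-- create_adjacency_map; its freshness asserts hold on every input Pre_ admits
def pvAdjMap (pairs : List (PvExt × PvExt)) : PySem.Dict PvExt PvExt :=
  pairs.foldl (fun d p => (d.insert p.1 p.2).insert p.2 p.1) PySem.Dict.empty

-- the 'while True' loop of the linear-chromosome phase; fuel only makes the recursion
-- structural (on Pre_ inputs the walk ends before the fuel does); the not-visited asserts
-- are no-ops on Pre_ inputs and are dropped (python -O semantics)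
def pvLinWalkA (aM : PySem.Dict PvExt PvExt) (sep : String) :
    Nat → PvExt → PySem.Dict PvExt Bool → List String → (List String × PySem.Dict PvExt Bool)
  | 0, _, v, acc => (acc, v)
  | fuel+1, curr, v, acc =>
    let v1 := v.insert curr true
    let xt := pvFlip curr.2
    let v2 := v1.insert (curr.1, xt) true
    let acc1 := acc ++ [if xt == "h" then pvFamily curr.1 sep else "-" ++ pvFamily curr.1 sep]
    match aM.get? (curr.1, xt) with
    | some c => pvLinWalkA aM sep fuel c v2 acc1
    | none => (acc1, v2)

-- the 'while True' loop of the circular-chromosome phase ('assert in a_map' raises where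
-- the match is none; that is outside Pre_, where this port just stops)
def pvCircWalkA (aM : PySem.Dict PvExt PvExt) (sep : String) :
    Nat → PvExt → PySem.Dict PvExt Bool → List String → (List String × PySem.Dict PvExt Bool)
  | 0, _, v, acc => (acc, v)
  | fuel+1, curr, v, acc =>
    let v1 := v.insert curr true
    let xt := pvFlip curr.2
    let v2 := v1.insert (curr.1, xt) true
    let acc1 := acc ++ [if xt == "h" then pvFamily curr.1 sep else "-" ++ pvFamily curr.1 sep]
    match aM.get? (curr.1, xt) with
    | some c => if v2.getD c false then (acc1, v2) else pvCircWalkA aM sep fuel c v2 acc1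
    | none => (acc1, v2)

-- 'for xtr in visited' iterates the keys present when the loop starts; on Pre_ inputs the
-- body only rewrites existing keys (a new key during iteration is a Python RuntimeError)
def get_unimog (genome : String) (genes : List (String × List String)) (adjacencies : List (String × List ((String × String) × (String × String)))) (sep : String) : String :=
  let aM := pvAdjMap ((PySem.Dict.mk adjacencies).getD genome [])
  let G := (PySem.Dict.mk genes).getD genome []
  let seed := G.foldl (fun st gene => (["h", "t"] : List String).foldl (fun st xt =>
      (st.1.insert (gene, xt) false,
       if aM.contains (gene, xt) then st.2 else st.2 ++ [((gene, xt) : PvExt)])) st)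
    ((PySem.Dict.empty : PySem.Dict PvExt Bool), ([] : List PvExt))
  let fuel := 2 * G.length + 1
  let lp := seed.2.foldl (fun st t =>
      if st.1.getD t false then st
      else
        let w := pvLinWalkA aM sep fuel t st.1 []
        (w.2, st.2 ++ [w.1])) (seed.1, ([] : List (List String)))
  let cp := lp.1.keys.foldl (fun st e =>
      if st.1.getD e false then st
      else
        let w := pvCircWalkA aM sep fuel e st.1 []
        (w.2, st.2 ++ [w.1])) (lp.1, ([] : List (List String)))
  let s1 := lp.2.foldl (fun s l => s ++ "\n" ++ PySem.Str.join " " l ++ " |") (">" ++ genome)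
  cp.2.foldl (fun s c => s ++ "\n" ++ PySem.Str.join " " c ++ " )") s1

-- ===== PORT B =====
-- recursive walk of Source B: emits this gene, follows the adjacency leaving its other extremity
def pvWalkLinB (aM : PySem.Dict PvExt PvExt) (sep : String) :
    Nat → PvExt → PySem.Set PvExt → (List String × PySem.Set PvExt)
  | 0, _, s => ([], s)
  | fuel+1, e, s =>
    let s1 := PySem.Set.add (PySem.Set.add s e) (e.1, pvFlip e.2)
    let tok := if e.2 == "t" then pvFamily e.1 sep else "-" ++ pvFamily e.1 sep
    match aM.get? (e.1, pvFlip e.2) with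
    | none => ([tok], s1)
    | some n =>
      let w := pvWalkLinB aM sep fuel n s1
      (tok :: w.1, w.2)

def pvWalkCircB (aM : PySem.Dict PvExt PvExt) (sep : String) :
    Nat → PvExt → PySem.Set PvExt → (List String × PySem.Set PvExt)
  | 0, _, s => ([], s)
  | fuel+1, e, s =>
    let s1 := PySem.Set.add (PySem.Set.add s e) (e.1, pvFlip e.2)
    let tok := if e.2 == "t" then pvFamily e.1 sep else "-" ++ pvFamily e.1 sep
    match aM.get? (e.1, pvFlip e.2) with
    | none => ([tok], s1)
    | some n =>
      if PySem.Set.contains s1 n then ([tok], s1)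
      else
        let w := pvWalkCircB aM sep fuel n s1
        (tok :: w.1, w.2)

def get_unimog_alt (genome : String) (genes : List (String × List String)) (adjacencies : List (String × List ((String × String) × (String × String)))) (sep : String) : String :=
  let aM := (((PySem.Dict.mk adjacencies).getD genome []).flatMap
      (fun p => [(p.1, p.2), (p.2, p.1)])).foldl (fun d q => d.insert q.1 q.2) PySem.Dict.empty
  let gs := (PySem.Dict.mk genes).getD genome []
  let exts := gs.flatMap (fun g => [((g, "h") : PvExt), (g, "t")])
  let fuel := 2 * gs.length + 1
  let lp := exts.foldl (fun st e =>
      if !aM.contains e && !PySem.Set.contains st.1 e then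
        let w := pvWalkLinB aM sep fuel e st.1
        (w.2, st.2 ++ [w.1])
      else st) ((PySem.Set.empty : PySem.Set PvExt), ([] : List (List String)))
  let cp := exts.foldl (fun st e =>
      if PySem.Set.contains st.1 e then st
      else
        let w := pvWalkCircB aM sep fuel e st.1
        (w.2, st.2 ++ [w.1])) (lp.1, ([] : List (List String)))
  PySem.Str.join "\n" ((">" ++ genome) ::
    (lp.2.map (fun c => PySem.Str.join " " c ++ " |") ++
     cp.2.map (fun c => PySem.Str.join " " c ++ " )")))

-- ===== PRECONDITION & SPEC =====
-- e is an extremity of a listed gene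
def pvExtOf (G : List String) (e : PvExt) : Prop := e.1 ∈ G ∧ (e.2 = "h" ∨ e.2 = "t")

-- Pre_ = the inputs on which the Python A returns: the genome is a key of both dicts, no
-- extremity occurs in two different adjacency pairs (A's freshness asserts raise there), each
-- pair lies entirely inside or entirely outside the genome's extremity set with no self-pair
-- inside it (a half-in pair or an inside self-pair makes A's walk raise when reached — except
-- for never-reached degenerate self-pairs, which Pre_ also excludes: see claim cites), and the
-- telomere count is even (A asserts it). Outside-lying self-pairs (e,e) that A never touches
-- are the only inputs A returns on that Pre_ excludes.
def Pre_get_unimog (genome : String) (genes : List (String × List String)) (adjacencies : List (String × List ((String × String) × (String × String)))) (sep : String) : Prop :=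
  genome ∈ genes.map Prod.fst ∧ genome ∈ adjacencies.map Prod.fst ∧
  List.Pairwise (fun p q : PvExt × PvExt => p.1 ≠ q.1 ∧ p.1 ≠ q.2 ∧ p.2 ≠ q.1 ∧ p.2 ≠ q.2)
    ((PySem.Dict.mk adjacencies).getD genome []) ∧
  (∀ p ∈ (PySem.Dict.mk adjacencies).getD genome [],
      (pvExtOf ((PySem.Dict.mk genes).getD genome []) p.1 ↔
       pvExtOf ((PySem.Dict.mk genes).getD genome []) p.2) ∧
      (pvExtOf ((PySem.Dict.mk genes).getD genome []) p.1 → p.1 ≠ p.2)) ∧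
  ((((PySem.Dict.mk genes).getD genome []).flatMap
        (fun g => [((g, "h") : PvExt), (g, "t")])).countP
      (fun e => !(((PySem.Dict.mk adjacencies).getD genome []).any
        (fun p => p.1 == e || p.2 == e)))) % 2 = 0

instance (genome : String) (genes : List (String × List String)) (adjacencies : List (String × List ((String × String) × (String × String)))) (sep : String) : Decidable (Pre_get_unimog genome genes adjacencies sep) := by unfold Pre_get_unimog pvExtOf; infer_instance

def pvWitness_get_unimog : String × (List (String × List String)) × (List (String × List ((String × String) × (String × String)))) × String :=
  ("A", [("A", ["x_1", "y_1"])], [("A", [(("x_1", "h"), ("y_1", "t"))])], "_")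

def Spec_get_unimog (genome : String) (genes : List (String × List String)) (adjacencies : List (String × List ((String × String) × (String × String)))) (sep : String) (out : String) : Prop := out = get_unimog_alt genome genes adjacencies sep
instance (genome : String) (genes : List (String × List String)) (adjacencies : List (String × List ((String × String) × (String × String)))) (sep : String) (out : String) : Decidable (Spec_get_unimog genome genes adjacencies sep out) := by unfold Spec_get_unimog; infer_instance

-- ===== CLAIM (what is proved, stated in full; the proofs are below) =====
def Claim_equal_get_unimog : Prop := ∀ (genome : String) (genes : List (String × List String)) (adjacencies : List (String × List ((String × String) × (String × String)))) (sep : String), Dom_get_unimog genome genes adjacencies sep → Pre_get_unimog genome genes adjacencies sep → Spec_get_unimog genome genes adjacencies sep (get_unimog genome genes adjacencies sep)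

-- ===== LEMMAS AND PROOFS =====

-- ---- basic bridges ----
lemma pvBoolExt {b c : Bool} (h : b = true ↔ c = true) : b = c := by
  cases b <;> cases c <;> simp_all

lemma pvContainsIff (s : PySem.Set PvExt) (x : PvExt) :
    PySem.Set.contains s x = true ↔ x ∈ s := by
  simp [PySem.Set.contains]

lemma pvTokEq (x a b : String) :
    (if pvFlip x == "h" then a else b) = (if x == "t" then a else b) := by
  unfold pvFlip
  by_cases h : x == "t" <;> simp [h]

lemma pvFlipHT (x : String) : pvFlip x = "h" ∨ pvFlip x = "t" := by
  unfold pvFlip; by_cases h : x == "t" <;> simp [h]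

-- ---- correspondence predicates ----
def pvRel (v : PySem.Dict PvExt Bool) (s : PySem.Set PvExt) : Prop :=
  ∀ e : PvExt, v.getD e false = PySem.Set.contains s e

def pvKeysSup (v : PySem.Dict PvExt Bool) (G : List String) : Prop :=
  ∀ e : PvExt, pvExtOf G e → e ∈ v.keys

def pvClosed (aM : PySem.Dict PvExt PvExt) (G : List String) : Prop :=
  ∀ k w, aM.get? k = some w → pvExtOf G k → pvExtOf G w

lemma pvRel_mark {v s} (h : pvRel v s) (a : PvExt) :
    pvRel (v.insert a true) (PySem.Set.add s a) := by
  intro e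
  rw [PySem.Dict.getD_insert]
  by_cases he : e = a
  · subst he
    apply pvBoolExt
    simp only [pvContainsIff, PySem.Set.mem_add]
    simp
  · rw [if_neg he]
    apply pvBoolExt
    rw [h e]
    simp only [pvContainsIff, PySem.Set.mem_add]
    simp [he]

lemma pvKeys_mark {v : PySem.Dict PvExt Bool} {a : PvExt} (ha : a ∈ v.keys) :
    (v.insert a true).keys = v.keys :=
  PySem.Dict.keys_insert_of_contains v true ((PySem.Dict.contains_iff_mem_keys v a).mpr ha)

-- ---- walk lockstep ----
lemma pvLinLock (aM : PySem.Dict PvExt PvExt) (sep : String) (G : List String)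
    (hC : pvClosed aM G) :
    ∀ (fuel : Nat) (e : PvExt) (v : PySem.Dict PvExt Bool) (s : PySem.Set PvExt)
      (acc : List String), pvRel v s → pvExtOf G e → pvKeysSup v G →
      (pvLinWalkA aM sep fuel e v acc).1 = acc ++ (pvWalkLinB aM sep fuel e s).1 ∧
      pvRel (pvLinWalkA aM sep fuel e v acc).2 (pvWalkLinB aM sep fuel e s).2 ∧
      (pvLinWalkA aM sep fuel e v acc).2.keys = v.keys := by
  intro fuel
  induction fuel with
  | zero =>
    intro e v s acc hR hE hK
    simp [pvLinWalkA, pvWalkLinB, hR]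
  | succ n ih =>
    intro e v s acc hR hE hK
    have hE2 : pvExtOf G (e.1, pvFlip e.2) := ⟨hE.1, pvFlipHT e.2⟩
    have hKeys2 : ((v.insert e true).insert (e.1, pvFlip e.2) true).keys = v.keys := by
      rw [pvKeys_mark, pvKeys_mark (hK _ hE)]
      rw [pvKeys_mark (hK _ hE)]; exact hK _ hE2
    have hRel2 : pvRel ((v.insert e true).insert (e.1, pvFlip e.2) true)
        (PySem.Set.add (PySem.Set.add s e) (e.1, pvFlip e.2)) :=
      pvRel_mark (pvRel_mark hR e) _
    have hK2 : pvKeysSup ((v.insert e true).insert (e.1, pvFlip e.2) true) G := by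
      intro x hx; rw [hKeys2]; exact hK x hx
    simp only [pvLinWalkA, pvWalkLinB]
    cases hget : aM.get? (e.1, pvFlip e.2) with
    | none =>
      dsimp only
      refine ⟨?_, hRel2, hKeys2⟩
      rw [pvTokEq]
    | some c =>
      have hEc : pvExtOf G c := hC _ _ hget hE2
      dsimp only
      obtain ⟨h1, h2, h3⟩ := ih c ((v.insert e true).insert (e.1, pvFlip e.2) true)
        (PySem.Set.add (PySem.Set.add s e) (e.1, pvFlip e.2))
        (acc ++ [if pvFlip e.2 == "h" then pvFamily e.1 sep else "-" ++ pvFamily e.1 sep])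
        hRel2 hEc hK2
      refine ⟨?_, h2, by rw [h3, hKeys2]⟩
      rw [h1, pvTokEq]
      simp

lemma pvCircLock (aM : PySem.Dict PvExt PvExt) (sep : String) (G : List String)
    (hC : pvClosed aM G) :
    ∀ (fuel : Nat) (e : PvExt) (v : PySem.Dict PvExt Bool) (s : PySem.Set PvExt)
      (acc : List String), pvRel v s → pvExtOf G e → pvKeysSup v G →
      (pvCircWalkA aM sep fuel e v acc).1 = acc ++ (pvWalkCircB aM sep fuel e s).1 ∧
      pvRel (pvCircWalkA aM sep fuel e v acc).2 (pvWalkCircB aM sep fuel e s).2 ∧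
      (pvCircWalkA aM sep fuel e v acc).2.keys = v.keys := by
  intro fuel
  induction fuel with
  | zero =>
    intro e v s acc hR hE hK
    simp [pvCircWalkA, pvWalkCircB, hR]
  | succ n ih =>
    intro e v s acc hR hE hK
    have hE2 : pvExtOf G (e.1, pvFlip e.2) := ⟨hE.1, pvFlipHT e.2⟩
    have hKeys2 : ((v.insert e true).insert (e.1, pvFlip e.2) true).keys = v.keys := by
      rw [pvKeys_mark, pvKeys_mark (hK _ hE)]
      rw [pvKeys_mark (hK _ hE)]; exact hK _ hE2
    have hRel2 : pvRel ((v.insert e true).insert (e.1, pvFlip e.2) true)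
        (PySem.Set.add (PySem.Set.add s e) (e.1, pvFlip e.2)) :=
      pvRel_mark (pvRel_mark hR e) _
    have hK2 : pvKeysSup ((v.insert e true).insert (e.1, pvFlip e.2) true) G := by
      intro x hx; rw [hKeys2]; exact hK x hx
    simp only [pvCircWalkA, pvWalkCircB]
    cases hget : aM.get? (e.1, pvFlip e.2) with
    | none =>
      dsimp only
      refine ⟨?_, hRel2, hKeys2⟩
      rw [pvTokEq]
    | some c =>
      have hEc : pvExtOf G c := hC _ _ hget hE2
      dsimp only
      rw [← hRel2 c]
      by_cases hvis : ((v.insert e true).insert (e.1, pvFlip e.2) true).getD c false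
      · rw [if_pos hvis, if_pos hvis]
        refine ⟨?_, hRel2, hKeys2⟩
        rw [pvTokEq]
      · rw [if_neg hvis, if_neg hvis]
        obtain ⟨h1, h2, h3⟩ := ih c ((v.insert e true).insert (e.1, pvFlip e.2) true)
          (PySem.Set.add (PySem.Set.add s e) (e.1, pvFlip e.2))
          (acc ++ [if pvFlip e.2 == "h" then pvFamily e.1 sep else "-" ++ pvFamily e.1 sep])
          hRel2 hEc hK2
        refine ⟨?_, h2, by rw [h3, hKeys2]⟩
        rw [h1, pvTokEq]
        simp

-- ---- adjacency map: A's two-insert loop = B's flat comprehension ----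
lemma pvAdjEq : ∀ (ps : List (PvExt × PvExt)) (d : PySem.Dict PvExt PvExt),
    ps.foldl (fun d p => (d.insert p.1 p.2).insert p.2 p.1) d
      = (ps.flatMap (fun p => [(p.1, p.2), (p.2, p.1)])).foldl
          (fun d q => d.insert q.1 q.2) d := by
  intro ps
  induction ps with
  | nil => intro d; rfl
  | cons p t ih => intro d; simp only [List.foldl_cons, List.flatMap_cons, List.foldl_append, ih]; rfl

lemma pvGetFold : ∀ (ps : List (PvExt × PvExt)) (d : PySem.Dict PvExt PvExt) (k w : PvExt),
    (ps.foldl (fun d p => (d.insert p.1 p.2).insert p.2 p.1) d).get? k = some w →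
    (∃ p ∈ ps, (k = p.1 ∧ w = p.2) ∨ (k = p.2 ∧ w = p.1)) ∨ d.get? k = some w := by
  intro ps
  induction ps with
  | nil => intro d k w h; exact Or.inr h
  | cons p t ih =>
    intro d k w h
    rcases ih _ _ _ h with ⟨q, hq, hc⟩ | hd
    · exact Or.inl ⟨q, List.mem_cons_of_mem _ hq, hc⟩
    · rw [PySem.Dict.get?_insert] at hd
      by_cases h2 : k = p.2
      · rw [if_pos h2] at hd
        exact Or.inl ⟨p, List.mem_cons_self .., Or.inr ⟨h2, (Option.some_inj.mp hd).symm⟩⟩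
      · rw [if_neg h2, PySem.Dict.get?_insert] at hd
        by_cases h1 : k = p.1
        · rw [if_pos h1] at hd
          exact Or.inl ⟨p, List.mem_cons_self .., Or.inl ⟨h1, (Option.some_inj.mp hd).symm⟩⟩
        · rw [if_neg h1] at hd; exact Or.inr hd

lemma pvClosedOf (G : List String) (adj : List (PvExt × PvExt))
    (hP : ∀ p ∈ adj, (pvExtOf G p.1 ↔ pvExtOf G p.2) ∧ (pvExtOf G p.1 → p.1 ≠ p.2)) :
    pvClosed (pvAdjMap adj) G := by
  intro k w hget hk
  unfold pvAdjMap at hget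
  rcases pvGetFold adj _ k w hget with ⟨p, hp, hc⟩ | hd
  · rcases hc with ⟨hk1, hw⟩ | ⟨hk2, hw⟩
    · subst hw; exact ((hP p hp).1.mp (hk1 ▸ hk))
    · subst hw; exact ((hP p hp).1.mpr (hk2 ▸ hk))
  · rw [PySem.Dict.get?_empty] at hd; cases hd

-- ---- seeding ----
lemma pvSeedFlat (aM : PySem.Dict PvExt PvExt) : ∀ (G : List String)
    (st : PySem.Dict PvExt Bool × List PvExt),
    G.foldl (fun st gene => (["h", "t"] : List String).foldl (fun st xt =>
        (st.1.insert (gene, xt) false,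
         if aM.contains (gene, xt) then st.2 else st.2 ++ [((gene, xt) : PvExt)])) st) st
      = (G.flatMap (fun g => [((g, "h") : PvExt), (g, "t")])).foldl (fun st e =>
          (st.1.insert e false, if aM.contains e then st.2 else st.2 ++ [e])) st := by
  intro G
  induction G with
  | nil => intro st; rfl
  | cons g t ih =>
    intro st
    rw [List.foldl_cons, List.flatMap_cons, List.foldl_append]
    exact ih _

lemma pvSeedGetD : ∀ (l : List PvExt) (v : PySem.Dict PvExt Bool),
    (∀ x, v.getD x false = false) →
    ∀ e, (l.foldl (fun v e => v.insert e false) v).getD e false = false := by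
  intro l
  induction l with
  | nil => intro v hv e; exact hv e
  | cons a t ih =>
    intro v hv e
    rw [List.foldl_cons]
    refine ih _ (fun x => ?_) e
    rw [PySem.Dict.getD_insert]
    by_cases hx : x = a
    · rw [if_pos hx]
    · rw [if_neg hx]; exact hv x

lemma pvTelsEq (aM : PySem.Dict PvExt PvExt) : ∀ (l : List PvExt) (tel : List PvExt),
    l.foldl (fun tel e => if aM.contains e then tel else tel ++ [e]) tel
      = tel ++ l.filter (fun e => !aM.contains e) := by
  intro l tel
  rw [← PySem.List.foldl_append_if_eq_filter]
  apply PySem.List.foldl_congr_mem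
  intro acc x _
  by_cases h : aM.contains x <;> simp [h]

-- ---- phase lockstep (shared by the linear and circular phases) ----
lemma pvPhase (G : List String)
    (walkA : PvExt → PySem.Dict PvExt Bool → List String → (List String × PySem.Dict PvExt Bool))
    (walkB : PvExt → PySem.Set PvExt → (List String × PySem.Set PvExt))
    (hlock : ∀ e v s acc, pvRel v s → pvExtOf G e → pvKeysSup v G →
      (walkA e v acc).1 = acc ++ (walkB e s).1 ∧
      pvRel (walkA e v acc).2 (walkB e s).2 ∧ (walkA e v acc).2.keys = v.keys) :
    ∀ (l : List PvExt) (v : PySem.Dict PvExt Bool) (s : PySem.Set PvExt)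
      (chroms : List (List String)),
      pvRel v s → pvKeysSup v G → (∀ e ∈ l, pvExtOf G e) →
      (l.foldl (fun st t => if st.1.getD t false then st
          else ((walkA t st.1 []).2, st.2 ++ [(walkA t st.1 []).1])) (v, chroms)).2
        = (l.foldl (fun st e => if PySem.Set.contains st.1 e then st
          else ((walkB e st.1).2, st.2 ++ [(walkB e st.1).1])) (s, chroms)).2 ∧
      pvRel (l.foldl (fun st t => if st.1.getD t false then st
          else ((walkA t st.1 []).2, st.2 ++ [(walkA t st.1 []).1])) (v, chroms)).1
        (l.foldl (fun st e => if PySem.Set.contains st.1 e then st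
          else ((walkB e st.1).2, st.2 ++ [(walkB e st.1).1])) (s, chroms)).1 ∧
      (l.foldl (fun st t => if st.1.getD t false then st
          else ((walkA t st.1 []).2, st.2 ++ [(walkA t st.1 []).1])) (v, chroms)).1.keys
        = v.keys := by
  intro l
  induction l with
  | nil => intro v s chroms hR hK _; exact ⟨rfl, hR, rfl⟩
  | cons t rest ih =>
    intro v s chroms hR hK hE
    rw [List.foldl_cons, List.foldl_cons]
    dsimp only
    rw [hR t]
    by_cases hvis : PySem.Set.contains s t = true
    · rw [if_pos hvis, if_pos hvis]
      exact ih v s chroms hR hK (fun e he => hE e (List.mem_cons_of_mem _ he))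
    · rw [if_neg hvis, if_neg hvis]
      obtain ⟨h1, h2, h3⟩ := hlock t v s [] hR (hE t (List.mem_cons_self ..)) hK
      rw [h1, List.nil_append]
      obtain ⟨g1, g2, g3⟩ := ih (walkA t v []).2 (walkB t s).2 (chroms ++ [(walkB t s).1])
        h2 (fun e he => h3 ▸ hK e he) (fun e he => hE e (List.mem_cons_of_mem _ he))
      exact ⟨g1, g2, by rw [g3, h3]⟩


-- ---- first-occurrence dedup: B's circular pass over all extremities skips marked ones,
--      so it equals the pass over the deduplicated key list A iterates ----
lemma pvSkipFilter {σ : Type} (step : σ → PvExt → σ) (M : σ → PvExt → Bool)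
    (H1 : ∀ st e, M st e = true → step st e = st)
    (H3 : ∀ st e x, M st x = true → M (step st e) x = true) :
    ∀ (l : List PvExt) (st : σ) (e : PvExt), M st e = true →
      l.foldl step st = (l.filter (fun x => !(x == e))).foldl step st := by
  intro l
  induction l with
  | nil => intro st e _; rfl
  | cons x t ih =>
    intro st e he
    by_cases hx : x = e
    · subst hx
      rw [List.foldl_cons, H1 st x he, List.filter_cons_of_neg (by simp)]
      exact ih st x he
    · rw [List.foldl_cons, List.filter_cons_of_pos (by simp [hx]), List.foldl_cons]
      exact ih (step st x) e (H3 st x e he)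

lemma pvAddConsOut : ∀ (l : List PvExt) (s : List PvExt) (e : PvExt), (∀ x ∈ l, x ≠ e) →
    List.foldl PySem.Set.add (e :: s) l = e :: List.foldl PySem.Set.add s l := by
  intro l
  induction l with
  | nil => intro s e _; rfl
  | cons x t ih =>
    intro s e hne
    have hxe : x ≠ e := hne x (List.mem_cons_self ..)
    rw [List.foldl_cons, List.foldl_cons]
    have hadd : PySem.Set.add (e :: s) x = e :: PySem.Set.add s x := by
      simp only [PySem.Set.add, PySem.Set.contains, List.contains_cons, beq_iff_eq,
        List.contains_eq_mem, decide_eq_true_eq]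
      by_cases hm : x ∈ s <;> simp [hxe, hm]
    rw [hadd]
    exact ih _ e (fun y hy => hne y (List.mem_cons_of_mem _ hy))

lemma pvAddMem : ∀ (l : List PvExt) (s : PySem.Set PvExt) (e : PvExt), e ∈ s →
    List.foldl PySem.Set.add s l = List.foldl PySem.Set.add s (l.filter (fun x => !(x == e))) := by
  intro l
  induction l with
  | nil => intro s e _; rfl
  | cons x t ih =>
    intro s e he
    by_cases hx : x = e
    · subst hx
      have : PySem.Set.add s x = s := by
        unfold PySem.Set.add
        rw [if_pos (by unfold PySem.Set.contains; simpa using he)]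
      rw [List.foldl_cons, this, List.filter_cons_of_neg (by simp)]
      exact ih s x he
    · rw [List.foldl_cons, List.filter_cons_of_pos (by simp [hx]), List.foldl_cons]
      exact ih (PySem.Set.add s x) e ((PySem.Set.mem_add s x e).mpr (Or.inl he))

lemma pvOfListCons (e : PvExt) (l : List PvExt) :
    PySem.Set.ofList (e :: l) = e :: PySem.Set.ofList (l.filter (fun x => !(x == e))) := by
  rw [PySem.Set.ofList_eq_foldl, PySem.Set.ofList_eq_foldl, List.foldl_cons]
  have h0 : PySem.Set.add ([] : PySem.Set PvExt) e = [e] := rfl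
  rw [h0, pvAddMem l [e] e (List.mem_singleton.mpr rfl)]
  exact pvAddConsOut _ [] e (fun x hx => by simpa using (List.mem_filter.mp hx).2)

lemma pvFoldDedup {σ : Type} (step : σ → PvExt → σ) (M : σ → PvExt → Bool)
    (H1 : ∀ st e, M st e = true → step st e = st)
    (H2 : ∀ st e, M (step st e) e = true)
    (H3 : ∀ st e x, M st x = true → M (step st e) x = true) :
    ∀ (n : Nat) (l : List PvExt), l.length ≤ n → ∀ st : σ,
      l.foldl step st = (PySem.Set.ofList l).foldl step st := by
  intro n
  induction n with
  | zero =>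
    intro l hl st
    rw [List.eq_nil_of_length_eq_zero (Nat.le_zero.mp hl)]
    rfl
  | succ m ih =>
    intro l hl st
    cases l with
    | nil => rfl
    | cons e t =>
      rw [pvOfListCons, List.foldl_cons, List.foldl_cons]
      rw [pvSkipFilter step M H1 H3 t (step st e) e (H2 st e)]
      exact ih _ (le_trans (List.length_filter_le _ _) (Nat.le_of_succ_le_succ hl)) _

-- ---- output assembly: A's '+=' folds are '\n'.join ----
lemma pvJoinFold : ∀ (xs : List String) (x : String),
    xs.foldl (fun s t => s ++ "\n" ++ t) x = PySem.Str.join "\n" (x :: xs) := by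
  intro xs
  induction xs with
  | nil =>
    intro x
    apply String.toList_inj.mp
    rw [PySem.Str.toList_join]
    simp [PySem.Chars.join_singleton]
  | cons y ys ih =>
    intro x
    rw [List.foldl_cons, ih]
    apply String.toList_inj.mp
    rw [PySem.Str.toList_join, PySem.Str.toList_join]
    cases ys with
    | nil =>
      simp [PySem.Chars.join_singleton, PySem.Chars.join_cons_cons, String.toList_append]
    | cons z zs =>
      simp [PySem.Chars.join_cons_cons, String.toList_append]

lemma pvAdjMapAlt (ps : List (PvExt × PvExt)) :
    (ps.flatMap (fun p => [(p.1, p.2), (p.2, p.1)])).foldl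
      (fun d q => d.insert q.1 q.2) PySem.Dict.empty = pvAdjMap ps :=
  (pvAdjEq ps _).symm

lemma pvCircMono (aM : PySem.Dict PvExt PvExt) (sep : String) :
    ∀ (fuel : Nat) (c : PvExt) (s : PySem.Set PvExt) (x : PvExt), x ∈ s →
      x ∈ (pvWalkCircB aM sep fuel c s).2 := by
  intro fuel
  induction fuel with
  | zero => intro c s x hx; exact hx
  | succ n ih =>
    intro c s x hx
    have hx1 : x ∈ PySem.Set.add (PySem.Set.add s c) (c.1, pvFlip c.2) :=
      (PySem.Set.mem_add _ _ _).mpr (Or.inl ((PySem.Set.mem_add _ _ _).mpr (Or.inl hx)))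
    simp only [pvWalkCircB]
    cases aM.get? (c.1, pvFlip c.2) with
    | none => exact hx1
    | some m =>
      dsimp only
      by_cases hc : PySem.Set.contains (PySem.Set.add (PySem.Set.add s c) (c.1, pvFlip c.2)) m = true
      · rw [if_pos hc]; exact hx1
      · rw [if_neg hc]; exact ih m _ x hx1

lemma pvCircSelf (aM : PySem.Dict PvExt PvExt) (sep : String) (n : Nat) (e : PvExt)
    (s : PySem.Set PvExt) : e ∈ (pvWalkCircB aM sep (n + 1) e s).2 := by
  have hx1 : e ∈ PySem.Set.add (PySem.Set.add s e) (e.1, pvFlip e.2) :=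
    (PySem.Set.mem_add _ _ _).mpr (Or.inl ((PySem.Set.mem_add _ _ _).mpr (Or.inr rfl)))
  simp only [pvWalkCircB]
  cases aM.get? (e.1, pvFlip e.2) with
  | none => exact hx1
  | some m =>
    dsimp only
    by_cases hc : PySem.Set.contains (PySem.Set.add (PySem.Set.add s e) (e.1, pvFlip e.2)) m = true
    · rw [if_pos hc]; exact hx1
    · rw [if_neg hc]; exact pvCircMono aM sep n m _ e hx1

lemma pvAsmStep (suf : String) : ∀ (l : List (List String)) (s : String),
    l.foldl (fun s c => s ++ "\n" ++ PySem.Str.join " " c ++ suf) s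
      = (l.map (fun c => PySem.Str.join " " c ++ suf)).foldl (fun s t => s ++ "\n" ++ t) s := by
  intro l
  induction l with
  | nil => intro s; rfl
  | cons c t ih =>
    intro s
    rw [List.foldl_cons, List.map_cons, List.foldl_cons, ih, String.append_assoc]

lemma pvAsm (x : String) (lins circs : List (List String)) :
    circs.foldl (fun s c => s ++ "\n" ++ PySem.Str.join " " c ++ " )")
      (lins.foldl (fun s l => s ++ "\n" ++ PySem.Str.join " " l ++ " |") x)
    = PySem.Str.join "\n" (x :: (lins.map (fun c => PySem.Str.join " " c ++ " |")
        ++ circs.map (fun c => PySem.Str.join " " c ++ " )"))) := by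
  rw [pvAsmStep, pvAsmStep, ← List.foldl_append, pvJoinFold]

lemma pvExtsOf (G : List String) :
    ∀ e ∈ G.flatMap (fun g => [((g, "h") : PvExt), (g, "t")]), pvExtOf G e := by
  intro e he
  rcases List.mem_flatMap.mp he with ⟨g, hg, hmem⟩
  simp only [List.mem_cons, List.not_mem_nil, or_false] at hmem
  rcases hmem with rfl | rfl
  · exact ⟨hg, Or.inl rfl⟩
  · exact ⟨hg, Or.inr rfl⟩

lemma pvKeysV0 (exts : List PvExt) :
    (exts.foldl (fun v (e : PvExt) => v.insert e false) PySem.Dict.empty).keys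
      = PySem.Set.ofList exts := by
  rw [PySem.Dict.keys_foldl_insert (f := fun _ _ => false), PySem.Dict.keys_empty,
    PySem.Set.ofList_eq_foldl]
  rfl

lemma pvMain (genome sep : String) (G : List String) (adj : List (PvExt × PvExt))
    (hEdge : ∀ p ∈ adj, (pvExtOf G p.1 ↔ pvExtOf G p.2) ∧ (pvExtOf G p.1 → p.1 ≠ p.2)) :
    (let aM := pvAdjMap adj
     let seed := G.foldl (fun st gene => (["h", "t"] : List String).foldl (fun st xt =>
         (st.1.insert (gene, xt) false,
          if aM.contains (gene, xt) then st.2 else st.2 ++ [((gene, xt) : PvExt)])) st)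
       ((PySem.Dict.empty : PySem.Dict PvExt Bool), ([] : List PvExt))
     let fuel := 2 * G.length + 1
     let lp := seed.2.foldl (fun st t =>
         if st.1.getD t false then st
         else
           let w := pvLinWalkA aM sep fuel t st.1 []
           (w.2, st.2 ++ [w.1])) (seed.1, ([] : List (List String)))
     let cp := lp.1.keys.foldl (fun st e =>
         if st.1.getD e false then st
         else
           let w := pvCircWalkA aM sep fuel e st.1 []
           (w.2, st.2 ++ [w.1])) (lp.1, ([] : List (List String)))
     let s1 := lp.2.foldl (fun s l => s ++ "\n" ++ PySem.Str.join " " l ++ " |") (">" ++ genome)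
     cp.2.foldl (fun s c => s ++ "\n" ++ PySem.Str.join " " c ++ " )") s1)
    =
    (let aM := (adj.flatMap (fun p => [(p.1, p.2), (p.2, p.1)])).foldl
        (fun d q => d.insert q.1 q.2) PySem.Dict.empty
     let exts := G.flatMap (fun g => [((g, "h") : PvExt), (g, "t")])
     let fuel := 2 * G.length + 1
     let lp := exts.foldl (fun st e =>
         if !aM.contains e && !PySem.Set.contains st.1 e then
           let w := pvWalkLinB aM sep fuel e st.1
           (w.2, st.2 ++ [w.1])
         else st) ((PySem.Set.empty : PySem.Set PvExt), ([] : List (List String)))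
     let cp := exts.foldl (fun st e =>
         if PySem.Set.contains st.1 e then st
         else
           let w := pvWalkCircB aM sep fuel e st.1
           (w.2, st.2 ++ [w.1])) (lp.1, ([] : List (List String)))
     PySem.Str.join "\n" ((">" ++ genome) ::
       (lp.2.map (fun c => PySem.Str.join " " c ++ " |") ++
        cp.2.map (fun c => PySem.Str.join " " c ++ " )")))) := by
  have hC : pvClosed (pvAdjMap adj) G := pvClosedOf G adj hEdge
  dsimp only
  rw [pvAdjMapAlt adj]
  rw [pvSeedFlat]
  rw [PySem.List.foldl_prod_mk (f := fun (v : PySem.Dict PvExt Bool) (e : PvExt) => v.insert e false)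
    (g := fun (tel : List PvExt) (e : PvExt) => if (pvAdjMap adj).contains e then tel else tel ++ [e])]
  dsimp only
  rw [pvTelsEq, List.nil_append]
  -- B's linear pass: split off the static telomere test, then lockstep with A's
  have hBsplit :
      (G.flatMap (fun g => [((g, "h") : PvExt), (g, "t")])).foldl
        (fun (st : PySem.Set PvExt × List (List String)) (e : PvExt) =>
          if !(pvAdjMap adj).contains e && !PySem.Set.contains st.1 e then
            ((pvWalkLinB (pvAdjMap adj) sep (2 * G.length + 1) e st.1).2,
             st.2 ++ [(pvWalkLinB (pvAdjMap adj) sep (2 * G.length + 1) e st.1).1])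
          else st) (PySem.Set.empty, ([] : List (List String)))
      = ((G.flatMap (fun g => [((g, "h") : PvExt), (g, "t")])).filter
          (fun e => !(pvAdjMap adj).contains e)).foldl
        (fun (st : PySem.Set PvExt × List (List String)) (e : PvExt) =>
          if PySem.Set.contains st.1 e then st
          else ((pvWalkLinB (pvAdjMap adj) sep (2 * G.length + 1) e st.1).2,
                st.2 ++ [(pvWalkLinB (pvAdjMap adj) sep (2 * G.length + 1) e st.1).1]))
        (PySem.Set.empty, ([] : List (List String))) := by
    rw [← PySem.List.foldl_if_eq_foldl_filter (p := fun e => !(pvAdjMap adj).contains e)]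
    apply PySem.List.foldl_congr_mem
    intro acc x _
    by_cases h1 : (pvAdjMap adj).contains x <;>
      by_cases h2 : PySem.Set.contains acc.1 x <;> simp [h1, h2]
  rw [hBsplit]
  obtain ⟨hl1, hl2, hl3⟩ := pvPhase G (pvLinWalkA (pvAdjMap adj) sep (2 * G.length + 1))
    (pvWalkLinB (pvAdjMap adj) sep (2 * G.length + 1))
    (pvLinLock (pvAdjMap adj) sep G hC (2 * G.length + 1))
    ((G.flatMap (fun g => [((g, "h") : PvExt), (g, "t")])).filter
      (fun e => !(pvAdjMap adj).contains e))
    ((G.flatMap (fun g => [((g, "h") : PvExt), (g, "t")])).foldl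
      (fun v (e : PvExt) => v.insert e false) PySem.Dict.empty)
    PySem.Set.empty []
    (fun e => by
      rw [pvSeedGetD _ _ (fun x => PySem.Dict.getD_empty _ _) e]; rfl)
    (fun e he => by
      rw [pvKeysV0]
      exact (PySem.Set.mem_ofList _ _).mpr
        (List.mem_flatMap.mpr ⟨e.1, he.1, by
          rcases he.2 with h | h <;> simp [← h]⟩))
    (fun e he => pvExtsOf G e (List.mem_of_mem_filter he))
  rw [hl1, hl3, pvKeysV0]
  -- B's circular pass over all extremities = the same pass over the deduplicated list
  have hdd := pvFoldDedup
    (fun (st : PySem.Set PvExt × List (List String)) (e : PvExt) =>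
      if PySem.Set.contains st.1 e then st
      else ((pvWalkCircB (pvAdjMap adj) sep (2 * G.length + 1) e st.1).2,
            st.2 ++ [(pvWalkCircB (pvAdjMap adj) sep (2 * G.length + 1) e st.1).1]))
    (fun st e => PySem.Set.contains st.1 e)
    (fun st e h => by dsimp only; rw [if_pos h])
    (fun st e => by
      dsimp only
      by_cases h : PySem.Set.contains st.1 e = true
      · rw [if_pos h]; exact h
      · rw [if_neg h]
        exact (pvContainsIff _ _).mpr (pvCircSelf (pvAdjMap adj) sep (2 * G.length) e st.1))
    (fun st e x h => by
      dsimp only at h ⊢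
      by_cases hc : PySem.Set.contains st.1 e = true
      · rw [if_pos hc]; exact h
      · rw [if_neg hc]
        exact (pvContainsIff _ _).mpr
          (pvCircMono (pvAdjMap adj) sep _ _ _ x ((pvContainsIff _ _).mp h)))
    (G.flatMap (fun g => [((g, "h") : PvExt), (g, "t")])).length
    (G.flatMap (fun g => [((g, "h") : PvExt), (g, "t")])) le_rfl
  rw [hdd]
  obtain ⟨hc1, _, _⟩ := pvPhase G (pvCircWalkA (pvAdjMap adj) sep (2 * G.length + 1))
    (pvWalkCircB (pvAdjMap adj) sep (2 * G.length + 1))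
    (pvCircLock (pvAdjMap adj) sep G hC (2 * G.length + 1))
    (PySem.Set.ofList (G.flatMap (fun g => [((g, "h") : PvExt), (g, "t")])))
    _ _ [] hl2
    (fun e he => by
      rw [hl3, pvKeysV0]
      exact (PySem.Set.mem_ofList _ _).mpr
        (List.mem_flatMap.mpr ⟨e.1, he.1, by
          rcases he.2 with h | h <;> simp [← h]⟩))
    (fun e he => pvExtsOf G e ((PySem.Set.mem_ofList _ _).mp he))
  rw [hc1, pvAsm]

theorem pv_get_unimog_eq (genome : String) (genes : List (String × List String))
    (adjacencies : List (String × List ((String × String) × (String × String))))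
    (sep : String)
    (hEdge : ∀ p ∈ (PySem.Dict.mk adjacencies).getD genome [],
      (pvExtOf ((PySem.Dict.mk genes).getD genome []) p.1 ↔
       pvExtOf ((PySem.Dict.mk genes).getD genome []) p.2) ∧
      (pvExtOf ((PySem.Dict.mk genes).getD genome []) p.1 → p.1 ≠ p.2)) :
    get_unimog genome genes adjacencies sep = get_unimog_alt genome genes adjacencies sep :=
  pvMain genome sep ((PySem.Dict.mk genes).getD genome [])
    ((PySem.Dict.mk adjacencies).getD genome []) hEdge

-- ===== VERDICT (by name: the statement is the Claim_ definition above) =====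
theorem get_unimog_spec : Claim_equal_get_unimog := by
  intro genome genes adjacencies sep _ hPre
  exact pv_get_unimog_eq genome genes adjacencies sep hPre.2.2.2.1
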